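-- pv_equiv track=rewrite | github.com/exploringweirdmachines/novel-text-splitter | main.py | create_chunked_text
-- ===== SOURCE A (Python) =====
-- from typing import List
--
-- def create_chunked_text(text: str, chunks: List[str], split_token: str = "段") -> str:
--     """Create text with split tokens inserted at chunk boundaries"""
--     if not text or not chunks:
--         return text
--
--     result = ""
--     pos = 0
--
--     for chunk in chunks:
--         chunk_pos = text.find(chunk, pos)
--         if chunk_pos == -1:
--             continue
--
--         if chunk_pos > pos:
--             result += text[pos:chunk_pos]
--
--         result += chunk + split_token
--         pos = chunk_pos + len(chunk)
--
--     if pos < len(text):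
--         result += text[pos:]
--
--     return result
-- ===== SOURCE B (Python) =====
-- def create_chunked_text(text: str, chunks, split_token: str = "段") -> str:
--     """Create text with split tokens inserted at chunk boundaries"""
--     if not text or not chunks:
--         return text
--     # Consume the text suffix-by-suffix: for each chunk found in the remaining
--     # text, cut off the prefix up to and including that occurrence as one piece.
--     pieces = []
--     rest = text
--     for chunk in chunks:
--         i = rest.find(chunk)
--         if i != -1:
--             cut = i + len(chunk)
--             pieces.append(rest[:cut])
--             rest = rest[cut:]
--     pieces.append(rest)
--     # The token is exactly the separator between consecutive pieces.
--     return split_token.join(pieces)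
-- ===== Notes on version B (the rewrite author's own statement) =====
-- stated objective: alternative
-- what changed: B keeps no position index and never appends the token itself: it consumes the text suffix-by-suffix, cutting off for each found chunk the prefix up to the end of its occurrence as one piece, and then returns split_token.join(pieces) so the token appears only as the join separator.
import Mathlib
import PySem

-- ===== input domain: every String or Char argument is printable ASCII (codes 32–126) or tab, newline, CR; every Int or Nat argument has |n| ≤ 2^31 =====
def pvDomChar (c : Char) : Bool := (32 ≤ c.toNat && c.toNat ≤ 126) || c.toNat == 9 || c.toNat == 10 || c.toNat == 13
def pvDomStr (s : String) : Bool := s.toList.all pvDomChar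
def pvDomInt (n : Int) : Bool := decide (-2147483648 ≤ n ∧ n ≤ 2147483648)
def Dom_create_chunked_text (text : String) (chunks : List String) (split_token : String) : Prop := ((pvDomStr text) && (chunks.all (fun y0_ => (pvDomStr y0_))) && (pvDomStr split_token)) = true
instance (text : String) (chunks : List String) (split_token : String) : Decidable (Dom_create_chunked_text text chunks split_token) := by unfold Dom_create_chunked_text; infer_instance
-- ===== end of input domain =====

-- B keeps no position index and never emits the token: it consumes the text suffix-by-suffix,
-- cutting off for each found chunk the prefix up to the end of its occurrence as one piece,
-- and returns split_token.join(pieces) (objective: alternative).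

-- ===== PORT A =====
-- A's loop body: find chunk from pos; skip on -1; append skipped text, the chunk and the token; advance pos
def ctcStepA (t st : List Char) (s : List Char × Int) (chunk : String) : List Char × Int :=
  let cp := PySem.Chars.findFrom t chunk.toList s.2 none
  if cp = -1 then s
  else
    let r := if cp > s.2 then s.1 ++ PySem.Chars.slice t (some s.2) (some cp) else s.1
    (r ++ chunk.toList ++ st, cp + PySem.Chars.len chunk.toList)

def create_chunked_text (text : String) (chunks : List String) (split_token : String) : String :=
  if text = "" ∨ chunks = [] then text
  else
    let t := text.toList
    let fin := chunks.foldl (ctcStepA t split_token.toList) ([], 0)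
    String.ofList (if fin.2 < PySem.Chars.len t then fin.1 ++ PySem.Chars.slice t (some fin.2) none else fin.1)

-- ===== PORT B =====
-- B's loop body: find chunk in the remaining text; if found, cut off the prefix up to the
-- end of the occurrence as one piece and keep the suffix as the new remaining text
def ctcPieceB (s : List (List Char) × List Char) (chunk : String) : List (List Char) × List Char :=
  let i := PySem.Chars.find s.2 chunk.toList
  if i ≠ -1 then
    let cut := i + PySem.Chars.len chunk.toList
    (s.1 ++ [PySem.Chars.slice s.2 none (some cut)], PySem.Chars.slice s.2 (some cut) none)
  else s

def create_chunked_text_alt (text : String) (chunks : List String) (split_token : String) : String :=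
  if text = "" ∨ chunks = [] then text
  else
    let fin := chunks.foldl ctcPieceB ([], text.toList)
    String.ofList (PySem.Chars.join split_token.toList (fin.1 ++ [fin.2]))

-- ===== PRECONDITION & SPEC =====
def Spec_create_chunked_text (text : String) (chunks : List String) (split_token : String) (out : String) : Prop := out = create_chunked_text_alt text chunks split_token
instance (text : String) (chunks : List String) (split_token : String) (out : String) : Decidable (Spec_create_chunked_text text chunks split_token out) := by unfold Spec_create_chunked_text; infer_instance

-- ===== CLAIM (what is proved, stated in full; the proofs are below) =====
def Claim_equal_create_chunked_text : Prop := ∀ (text : String) (chunks : List String) (split_token : String), Dom_create_chunked_text text chunks split_token → Spec_create_chunked_text text chunks split_token (create_chunked_text text chunks split_token)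

-- ===== LEMMAS AND PROOFS =====

-- the common value both programs compute from position k on
def ctcCore (t st : List Char) : List String → Nat → List Char
  | [], k => t.drop k
  | c :: cs, k =>
    let f := PySem.Chars.find (t.drop k) c.toList
    if f = -1 then ctcCore t st cs k
    else (t.drop k).take (f.toNat + c.toList.length) ++ st ++ ctcCore t st cs (k + f.toNat + c.toList.length)

-- B's pieces and final position, at the Nat level
def ctcPieces (t : List Char) : List String → Nat → List (List Char) × Nat
  | [], k => ([], k)
  | c :: cs, k =>
    let f := PySem.Chars.find (t.drop k) c.toList
    if f = -1 then ctcPieces t cs k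
    else
      let r := ctcPieces t cs (k + f.toNat + c.toList.length)
      ((t.drop k).take (f.toNat + c.toList.length) :: r.1, r.2)

theorem take_append_of_prefix_drop {l sub : List Char} {n : Nat} (h : sub <+: l.drop n) :
    l.take n ++ sub = l.take (n + sub.length) := by
  obtain ⟨rest, hr⟩ := h
  rw [List.take_add, ← hr, List.take_left']
  simp

-- facts about a successful find
theorem ctc_find_facts (t : List Char) (c : String) (k : Nat) (hk : k ≤ t.length)
    (h : PySem.Chars.find (t.drop k) c.toList ≠ -1) :
    (PySem.Chars.find (t.drop k) c.toList).toNat + c.toList.length ≤ t.length - k ∧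
    c.toList <+: (t.drop k).drop (PySem.Chars.find (t.drop k) c.toList).toNat := by
  have h0 : 0 ≤ PySem.Chars.find (t.drop k) c.toList := by
    have := PySem.Chars.neg_one_le_find (t.drop k) c.toList
    omega
  have hsp := (PySem.Chars.find_spec h0).1
  have hlen := PySem.Chars.find_le_length (t.drop k) c.toList
  have hlp := hsp.length_le
  rw [List.length_drop] at hlen
  rw [List.length_drop, List.length_drop] at hlp
  exact ⟨by omega, hsp⟩

theorem ctcA_loop (t st : List Char) (cs : List String) : ∀ (k : Nat) (r : List Char), k ≤ t.length →
    (let fin := List.foldl (ctcStepA t st) (r, (k : Int)) cs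
     (if fin.2 < PySem.Chars.len t then fin.1 ++ PySem.Chars.slice t (some fin.2) none else fin.1))
    = r ++ ctcCore t st cs k := by
  induction cs with
  | nil =>
    intro k r hk
    simp only [List.foldl_nil, ctcCore, PySem.Chars.len_eq, PySem.Chars.slice_eq_listSlice,
      PySem.List.slice_from_natCast]
    split_ifs with h
    · rfl
    · have : k = t.length := by omega
      simp [this]
  | cons c cs ih =>
    intro k r hk
    simp only [List.foldl_cons]
    rw [show ctcStepA t st (r, (k : Int)) c =
        (let cp := PySem.Chars.findFrom t c.toList (k : Int) none
         if cp = -1 then (r, (k : Int))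
         else ((if cp > (k : Int) then r ++ PySem.Chars.slice t (some (k : Int)) (some cp) else r)
                ++ c.toList ++ st, cp + PySem.Chars.len c.toList)) from rfl]
    rw [PySem.Chars.findFrom_natCast t c.toList k hk]
    by_cases h : PySem.Chars.find (t.drop k) c.toList = -1
    · simp only [h, reduceIte]
      rw [ctcCore]
      simp only [h, reduceIte]
      exact ih k r hk
    · obtain ⟨hb, hpre⟩ := ctc_find_facts t c k hk h
      set f := PySem.Chars.find (t.drop k) c.toList with hf
      have h0 : 0 ≤ f := by
        have := PySem.Chars.neg_one_le_find (t.drop k) c.toList; rw [← hf] at this; omega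
      have hfn : f = ((f.toNat : Nat) : Int) := by omega
      simp only [h, reduceIte]
      have hne : ¬ ((k : Int) + f = -1) := by omega
      simp only [hne, reduceIte]
      have hslice : PySem.List.slice t (some (k : Int)) (some ((k : Int) + f)) =
          (t.drop k).take f.toNat := by
        rw [hfn]
        exact_mod_cast PySem.List.slice_natCast_add t k f.toNat
      have hres : (if (k : Int) + f > (k : Int) then
            r ++ PySem.Chars.slice t (some (k : Int)) (some ((k : Int) + f)) else r)
            ++ c.toList ++ st
          = r ++ ((t.drop k).take (f.toNat + c.toList.length) ++ st) := by
        rw [← take_append_of_prefix_drop hpre]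
        simp only [PySem.Chars.slice_eq_listSlice, hslice]
        split_ifs with hgt
        · simp
        · have : f.toNat = 0 := by omega
          simp [this]
      rw [hres]
      have hpos : (k : Int) + f + PySem.Chars.len c.toList
          = ((k + f.toNat + c.toList.length : Nat) : Int) := by
        simp [PySem.Chars.len_eq]; omega
      rw [hpos]
      have hk' : k + f.toNat + c.toList.length ≤ t.length := by omega
      rw [ih (k + f.toNat + c.toList.length) _ hk']
      rw [ctcCore]
      simp only [← hf, h, reduceIte]
      simp

-- B's fold, related to ctcPieces: the carried suffix is always t.drop k
theorem ctcB_loop (t : List Char) (cs : List String) : ∀ (k : Nat) (ps : List (List Char)), k ≤ t.length →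
    List.foldl ctcPieceB (ps, t.drop k) cs
      = (ps ++ (ctcPieces t cs k).1, t.drop (ctcPieces t cs k).2) := by
  induction cs with
  | nil => intro k ps _; simp [ctcPieces]
  | cons c cs ih =>
    intro k ps hk
    simp only [List.foldl_cons]
    rw [show ctcPieceB (ps, t.drop k) c =
        (let i := PySem.Chars.find (t.drop k) c.toList
         if i ≠ -1 then
           (ps ++ [PySem.Chars.slice (t.drop k) none (some (i + PySem.Chars.len c.toList))],
            PySem.Chars.slice (t.drop k) (some (i + PySem.Chars.len c.toList)) none)
         else (ps, t.drop k)) from rfl]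
    by_cases h : PySem.Chars.find (t.drop k) c.toList = -1
    · simp only [h, ne_eq, not_true_eq_false, reduceIte]
      rw [ctcPieces]
      simp only [h, reduceIte]
      exact ih k ps hk
    · obtain ⟨hb, _⟩ := ctc_find_facts t c k hk h
      set f := PySem.Chars.find (t.drop k) c.toList with hf
      have h0 : 0 ≤ f := by
        have := PySem.Chars.neg_one_le_find (t.drop k) c.toList; rw [← hf] at this; omega
      have hcut : f + PySem.Chars.len c.toList = ((f.toNat + c.toList.length : Nat) : Int) := by
        simp [PySem.Chars.len_eq]; omega
      have hto : PySem.Chars.slice (t.drop k) none (some ((f.toNat + c.toList.length : Nat) : Int))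
          = (t.drop k).take (f.toNat + c.toList.length) := by
        rw [PySem.Chars.slice_eq_listSlice]
        exact PySem.List.slice_to_natCast _ _
      have hfrom : PySem.Chars.slice (t.drop k) (some ((f.toNat + c.toList.length : Nat) : Int)) none
          = t.drop (k + f.toNat + c.toList.length) := by
        rw [PySem.Chars.slice_eq_listSlice, PySem.List.slice_from_natCast, List.drop_drop]
        congr 1
        omega
      simp only [h, ne_eq, not_false_eq_true, reduceIte, hcut, hto, hfrom]
      rw [ih (k + f.toNat + c.toList.length) _ (by omega)]
      rw [ctcPieces]
      simp only [← hf, h, reduceIte]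
      simp

-- the first piece splits off the join when a trailing element guarantees the tail is nonempty
theorem ctc_join_cons (st a x : List Char) (l : List (List Char)) :
    PySem.Chars.join st (a :: (l ++ [x])) = a ++ st ++ PySem.Chars.join st (l ++ [x]) := by
  cases l with
  | nil => rw [List.nil_append, PySem.Chars.join_cons_cons]
  | cons b m => rw [List.cons_append, PySem.Chars.join_cons_cons]

-- joining B's pieces (with the trailing suffix) yields the common core value
theorem ctcPieces_join (t st : List Char) (cs : List String) : ∀ (k : Nat), k ≤ t.length →
    PySem.Chars.join st ((ctcPieces t cs k).1 ++ [t.drop (ctcPieces t cs k).2])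
      = ctcCore t st cs k := by
  induction cs with
  | nil => intro k _; simp [ctcPieces, ctcCore, PySem.Chars.join_singleton]
  | cons c cs ih =>
    intro k hk
    rw [ctcPieces, ctcCore]
    by_cases h : PySem.Chars.find (t.drop k) c.toList = -1
    · simp only [h, reduceIte]
      exact ih k hk
    · obtain ⟨hb, _⟩ := ctc_find_facts t c k hk h
      simp only [h, reduceIte, List.cons_append]
      rw [ctc_join_cons, ih _ (by omega)]

-- ===== VERDICT (by name: the statement is the Claim_ definition above) =====
theorem create_chunked_text_spec : Claim_equal_create_chunked_text := by
  intro text chunks split_token _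
  unfold Spec_create_chunked_text create_chunked_text create_chunked_text_alt
  by_cases hg : text = "" ∨ chunks = []
  · simp [hg]
  · simp only [hg, reduceIte]
    have hA := ctcA_loop text.toList split_token.toList chunks 0 [] (by omega)
    have hB := ctcB_loop text.toList chunks 0 [] (by omega)
    simp only [Nat.cast_zero, List.drop_zero, List.nil_append] at hA hB
    rw [hA, hB, ctcPieces_join text.toList split_token.toList chunks 0 (by omega)]
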